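/- GENERATED by mk_final_copies.py from the proof of the farm's unit `start_decoder.C5` (farm:start_decoder.C5.2: Proof.lean) as the
   re-elaboration sweep compiled it — do not edit. -/
import Asan.CheckWalk
import Vorbis.Spec.Units.start_decoder_C5
import Vorbis.Spec.StartDecoderCarry
import Vorbis.Spec.Worked.start_decoder_C5_Lemmas

open X86 X86.User Asan Vorbis Vorbis.Spec Vorbis.Spec.StartDecoder

set_option maxRecDepth 4000
set_option maxHeartbeats 4000000

namespace Vorbis.Spec.start_decoder_C5

/-- **Segment C5 of `start_decoder`** (0x114594 … 0x114667 + ERRSTUB(3) 0x114825 + the counting loop 0x11483c … 0x114879; C lines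
3799–3820), from the entry assertion `InC5` to `AtC6` or `AtERR`. The pieces (Lemmas.lean), glued by `ReachVia.trans`:
`c5a_ok` (entry → `AtC6` | the return of `setup_malloc` at `cut110`), `c5b_ok` (`cut110` → `ret149` after memcpy | ERRSTUB(3) →
`AtERR`), `c5c_ok` (`ret149` → `cut112` after `setup_temp_free`), `c5d_ok` (`cut112` → the counting loop → `AtC6`). -/
theorem seg_ok {Lay : Layout} (hLay : Lay.hi = 0x1000000) {μ : Microarch} (hμ : UserX.MicroOK μ) {u₀ : State}
    (hcode : HasCodeNat Lay u₀ Vorbis.L.start_decoder.entry Vorbis.Code.code_start_decoder.nat Vorbis.L.start_decoder.size)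
    (hload1 : Asan.SmallCheck Lay μ Vorbis.WayInv (Vorbis.CodeOK u₀) [.rax, .rdx] 1 Vorbis.L.__asan_load1_noabort.entry)
    (hload4 : Asan.SmallCheck Lay μ Vorbis.WayInv (Vorbis.CodeOK u₀) [.rax, .rcx, .rdx] 4 Vorbis.L.__asan_load4_noabort.entry)
    (hmalloc : ∀ (others : List Obj) (frames : List (Nat × FrameLayout)) (A : Arena),
      Calls Lay μ Vorbis.WayInv (Vorbis.conv u₀) Vorbis.L.setup_malloc.entry (Vorbis.Spec.setup_malloc.spec others frames A))
    (hstore8 : Asan.SmallCheck Lay μ Vorbis.WayInv (Vorbis.CodeOK u₀) [.rax, .rcx, .rdx] 8 Vorbis.L.__asan_store8_noabort.entry)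
    (hmemcpy : ∀ (others : List Obj) (frames : List (Nat × FrameLayout)),
      Calls Lay μ Vorbis.WayInv (Vorbis.conv u₀) Vorbis.L.memcpy.entry (Vorbis.Spec.memcpy.spec others frames))
    (hfree : ∀ (others : List Obj) (frames : List (Nat × FrameLayout)) (A : Arena) (m : Nat) (rest : List (Nat × Nat)),
      Calls Lay μ Vorbis.WayInv (Vorbis.conv u₀) Vorbis.L.setup_temp_free.entry
        (Vorbis.Spec.setup_temp_free.spec others frames A m rest))
    (hload8 : Asan.SmallCheck Lay μ Vorbis.WayInv (Vorbis.CodeOK u₀) [.rax, .rcx, .rdx] 8 Vorbis.L.__asan_load8_noabort.entry)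
    (hstore1 : Asan.SmallCheck Lay μ Vorbis.WayInv (Vorbis.CodeOK u₀) [.rax, .rdx] 1 Vorbis.L.__asan_store1_noabort.entry)
    (herror : ∀ (others : List Obj) (frames : List (Nat × FrameLayout)),
      Calls Lay μ Vorbis.WayInv (Vorbis.conv u₀) Vorbis.L.error.entry (Vorbis.Spec.error.spec others frames))
    {g : Ghost} {i : Nat} {A2 A3 Ai : Arena} {A : Arena × List Obj} {lengths total : Nat} {v : State}
    (hin : InC5 u₀ g i A2 A3 Ai A lengths total v) :
    ReachVia Lay μ Vorbis.WayInv v (fun w => AtC6 u₀ g i w ∨ AtERR u₀ g w) := by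
  -- 0x114594 … 0x1145e9: the paths that do not convert end here; the conversion reaches the return of setup_malloc
  refine (c5a_ok hLay hμ hcode hload1 hload4 hmalloc hin).trans ?_
  intro s hs
  rcases hs with hdone | ⟨A', hm⟩
  · exact ReachVia.done hdone
  -- 0x1145e9 … 0x114625: the store of `codeword_lengths`, the NULL test (ERRSTUB(3)), memcpy
  refine (c5b_ok hLay hμ hcode hload4 hstore8 hmemcpy herror hm).trans ?_
  intro t ht
  rcases ht with ⟨A'', hn⟩ | herr
  · -- 0x114625 … 0x114636: setup_temp_free
    refine (c5c_ok hLay hμ hcode hfree hn).trans ?_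
    intro r hr
    obtain ⟨A3', ho⟩ := hr
    -- 0x114636 … 0x114668: `lengths = c->codeword_lengths`, `c->sparse = 0`, the counting loop
    exact c5d_ok hLay hμ hcode hload1 hload4 hload8 hstore1 ho
  · exact ReachVia.done (Or.inr herr)

end Vorbis.Spec.start_decoder_C5

/-- The unit `start_decoder.C5`: `seg_ok` at every entry state. -/
theorem Vorbis.Spec.Worked.start_decoder_C5_ok : Vorbis.Spec.start_decoder_C5.Statement := by
  unfold Vorbis.Spec.start_decoder_C5.Statement
  intro Lay hLay μ hμ u₀ hcode hload1 hload4 hmalloc hstore8 hmemcpy hfree hload8 hstore1 herror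
  intro g i v hat
  obtain ⟨A, lengths, total, A2, A3, Ai, hin⟩ := hat
  exact Vorbis.Spec.start_decoder_C5.seg_ok hLay hμ hcode hload1 hload4 hmalloc hstore8 hmemcpy hfree hload8 hstore1 herror hin
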